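-- pv_equiv track=rewrite | github.com/binary-husky/unreal-map | VISUALIZE/seaborn_defaults.py | lift_key_in_dict_list
-- ===== SOURCE A (Python) =====
-- def lift_key_in_dict_list(dict_list, key):
--     res = []
--     for d in dict_list:
--         if any([v == key for k, v in d.items()]):
--             res.append(d)
--
--     for d in dict_list:
--         if not any([v == key for k, v in d.items()]):
--             res.append(d)
--     return res
-- ===== SOURCE B (Python) =====
-- def lift_key_in_dict_list(dict_list, key):
--     matches = []
--     rest = []
--     for d in dict_list:
--         if key in d.values():
--             matches.append(d)
--         else:
--             rest.append(d)
--     return matches + rest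
-- ===== Notes on version B (the rewrite author's own statement) =====
-- stated objective: simpler
-- what changed: Single-pass two-bucket partition (matches/rest) with a `key in d.values()` membership test, replacing A's two separate filtering scans over dict_list with per-dict list comprehensions fed to any().
import Mathlib
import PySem

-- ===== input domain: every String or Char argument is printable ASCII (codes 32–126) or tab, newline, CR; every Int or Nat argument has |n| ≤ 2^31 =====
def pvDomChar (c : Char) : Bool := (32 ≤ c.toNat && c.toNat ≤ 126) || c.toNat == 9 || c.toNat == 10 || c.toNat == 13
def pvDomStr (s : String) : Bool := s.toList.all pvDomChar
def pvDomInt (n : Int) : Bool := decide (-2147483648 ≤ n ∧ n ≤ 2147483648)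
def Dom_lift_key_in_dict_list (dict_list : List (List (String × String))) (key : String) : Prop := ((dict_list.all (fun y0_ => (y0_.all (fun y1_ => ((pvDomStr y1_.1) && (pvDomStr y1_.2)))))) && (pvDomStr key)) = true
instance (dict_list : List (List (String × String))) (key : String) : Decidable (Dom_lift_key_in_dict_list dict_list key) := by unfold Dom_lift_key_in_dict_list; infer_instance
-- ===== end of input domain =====

-- B: one-pass two-bucket partition instead of A's two filtering scans; return value only.
-- ===== PORT A =====
def lift_key_in_dict_list (dict_list : List (List (String × String))) (key : String) : List (List (String × String)) :=
  -- first loop: append dicts where any value equals key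
  let res := dict_list.foldl (fun res d =>
    if d.any (fun kv => kv.2 == key) then res ++ [d] else res) []
  -- second loop: append dicts where no value equals key
  dict_list.foldl (fun res d =>
    if !(d.any (fun kv => kv.2 == key)) then res ++ [d] else res) res

-- ===== PORT B =====
-- one pass, two buckets; `key in d.values()` is membership in the value list
def lift_key_in_dict_list_alt (dict_list : List (List (String × String))) (key : String) : List (List (String × String)) :=
  let (ms, rest) := dict_list.foldl (fun (acc : List (List (String × String)) × List (List (String × String))) d =>
    if (d.map Prod.snd).contains key then (acc.1 ++ [d], acc.2) else (acc.1, acc.2 ++ [d])) ([], [])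
  ms ++ rest

-- ===== PRECONDITION & SPEC =====
def Spec_lift_key_in_dict_list (dict_list : List (List (String × String))) (key : String) (out : List (List (String × String))) : Prop := out = lift_key_in_dict_list_alt dict_list key
instance (dict_list : List (List (String × String))) (key : String) (out : List (List (String × String))) : Decidable (Spec_lift_key_in_dict_list dict_list key out) := by unfold Spec_lift_key_in_dict_list; infer_instance

-- ===== CLAIM (what is proved, stated in full; the proofs are below) =====
def Claim_equal_lift_key_in_dict_list : Prop := ∀ (dict_list : List (List (String × String))) (key : String), Dom_lift_key_in_dict_list dict_list key → Spec_lift_key_in_dict_list dict_list key (lift_key_in_dict_list dict_list key)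

-- ===== LEMMAS AND PROOFS =====


lemma pvA_fold (key : String) (dl : List (List (String × String))) (p : List (String × String) → Bool) (acc : List (List (String × String))) :
    dl.foldl (fun res d => if p d then res ++ [d] else res) acc = acc ++ dl.filter p := by
  induction dl generalizing acc with
  | nil => simp
  | cons h t ih =>
    by_cases hp : p h <;> simp [List.foldl, hp, ih, List.filter]

lemma pvB_fold (key : String) (dl : List (List (String × String))) (m r : List (List (String × String))) :
    dl.foldl (fun (acc : List (List (String × String)) × List (List (String × String))) d =>
      if (d.map Prod.snd).contains key then (acc.1 ++ [d], acc.2) else (acc.1, acc.2 ++ [d])) (m, r)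
    = (m ++ dl.filter (fun d => (d.map Prod.snd).contains key),
       r ++ dl.filter (fun d => !(d.map Prod.snd).contains key)) := by
  induction dl generalizing m r with
  | nil => simp
  | cons h t ih =>
    by_cases hp : (h.map Prod.snd).contains key <;>
      simp only [List.foldl, hp, ih, List.filter, if_pos, if_neg, Bool.not_true, Bool.not_false,
        Bool.false_eq_true, not_false_eq_true, ite_true, ite_false] <;> simp [List.append_assoc]

lemma pvPred_eq (key : String) (d : List (String × String)) :
    (d.map Prod.snd).contains key = d.any (fun kv => kv.2 == key) := by
  induction d with
  | nil => rfl
  | cons h t ih =>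
    simp only [List.map_cons, List.contains_cons, List.any_cons, ih]
    have : (key == h.2) = (h.2 == key) := by
      by_cases h' : key = h.2
      · simp [h']
      · simp [h', Ne.symm h']
    rw [this]

-- ===== VERDICT (by name: the statement is the Claim_ definition above) =====
theorem lift_key_in_dict_list_spec : Claim_equal_lift_key_in_dict_list := by
  intro dl key _
  unfold Spec_lift_key_in_dict_list lift_key_in_dict_list lift_key_in_dict_list_alt
  simp only [pvA_fold key, pvB_fold key, List.nil_append]
  congr 1 <;> apply List.filter_congr <;> intro d _ <;> rw [← pvPred_eq key d] <;> simp [List.contains_iff_mem]
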